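-- pv_equiv track=rewrite | github.com/getim/advent-of-code | 2020/24/main.py | read_instructions
-- ===== SOURCE A (Python) =====
-- def read_instructions(lines):
--     instructions = []
--     for line in lines:
--         steps = []
--         step = ''
--         for c in line:
--             if step:
--                 steps.append(step + c)
--                 step = ''
--             elif c in ['e', 'w']:
--                 steps.append(c)
--             else:
--                 step += c
--         instructions.append(steps)
--     return instructions
-- ===== SOURCE B (Python) =====
-- def read_instructions(lines):
--     instructions = []
--     for line in lines:
--         steps = []
--         i = 0
--         n = len(line)
--         while i < n:
--             if line[i] in ('e', 'w'):
--                 steps.append(line[i])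
--                 i += 1
--             else:
--                 if i + 1 < n:
--                     steps.append(line[i:i + 2])
--                 i += 2
--         instructions.append(steps)
--     return instructions
-- ===== Notes on version B (the rewrite author's own statement) =====
-- stated objective: alternative
-- what changed: Replaced the one-char pending-accumulator state machine with an index-based while loop that reads ahead: emit a single 'e'/'w' char, or slice a two-char token line[i:i+2] guarded by i+1<len(line), advancing by 1 or 2.
import Mathlib
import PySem

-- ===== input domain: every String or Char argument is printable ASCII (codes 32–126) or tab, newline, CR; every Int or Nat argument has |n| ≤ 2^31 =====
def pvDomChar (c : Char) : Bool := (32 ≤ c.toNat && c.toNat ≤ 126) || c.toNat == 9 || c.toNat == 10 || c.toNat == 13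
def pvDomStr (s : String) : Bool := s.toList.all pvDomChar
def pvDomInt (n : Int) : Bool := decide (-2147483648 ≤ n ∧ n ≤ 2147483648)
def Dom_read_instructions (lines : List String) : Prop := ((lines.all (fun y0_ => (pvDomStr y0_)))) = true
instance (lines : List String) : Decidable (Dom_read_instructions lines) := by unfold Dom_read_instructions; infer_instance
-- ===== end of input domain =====

-- B replaces A's pending-char state machine with an index loop that reads two-char tokens ahead by slicing; same output, alternative decomposition.

-- ===== PORT A =====
-- state: (steps so far, pending step as its character list; Python's `step` string)
def pvStepA (st : List String × List Char) (c : Char) : List String × List Char :=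
  if st.2 ≠ [] then (st.1 ++ [String.mk (st.2 ++ [c])], [])
  else if c = 'e' ∨ c = 'w' then (st.1 ++ [String.mk [c]], st.2)
  else (st.1, st.2 ++ [c])

def read_instructions (lines : List String) : List (List String) :=
  lines.map (fun line => ((line.toList).foldl pvStepA ([], [])).1)

-- ===== PORT B =====
-- the while loop over index i, consuming 1 char ('e'/'w') or 2 chars (slice line[i:i+2], dropped if i+1 ≥ len)
def pvTokensB : List Char → List String
  | [] => []
  | c :: rest =>
    if c = 'e' ∨ c = 'w' then String.mk [c] :: pvTokensB rest
    else match rest with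
      | [] => []
      | d :: rest' => String.mk [c, d] :: pvTokensB rest'

def read_instructions_alt (lines : List String) : List (List String) :=
  lines.map (fun line => pvTokensB line.toList)

-- ===== PRECONDITION & SPEC =====
def Spec_read_instructions (lines : List String) (out : List (List String)) : Prop := out = read_instructions_alt lines
instance (lines : List String) (out : List (List String)) : Decidable (Spec_read_instructions lines out) := by unfold Spec_read_instructions; infer_instance

-- ===== CLAIM (what is proved, stated in full; the proofs are below) =====
def Claim_equal_read_instructions : Prop := ∀ (lines : List String), Dom_read_instructions lines → Spec_read_instructions lines (read_instructions lines)

-- ===== LEMMAS AND PROOFS =====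
theorem pvFoldA_eq (l : List Char) : ∀ acc : List String,
    (l.foldl pvStepA (acc, [])).1 = acc ++ pvTokensB l := by
  induction l using pvTokensB.induct with
  | case1 => intro acc; simp [pvTokensB]
  | case2 c rest hc ih =>
      intro acc
      simp only [List.foldl]
      rw [show pvStepA (acc, []) c = (acc ++ [String.mk [c]], []) from by
        simp [pvStepA, hc]]
      rw [ih]
      conv_rhs => rw [pvTokensB.eq_def]
      simp [hc]
  | case3 c hc =>
      intro acc
      simp [pvStepA, pvTokensB, hc]
  | case4 c hc d rest' ih =>
      intro acc
      simp only [List.foldl]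
      rw [show pvStepA (acc, []) c = (acc, [c]) from by simp [pvStepA, hc]]
      rw [show pvStepA (acc, [c]) d = (acc ++ [String.mk [c, d]], []) from by
        simp [pvStepA]]
      rw [ih]
      conv_rhs => rw [pvTokensB.eq_def]
      simp [hc]

-- ===== VERDICT (by name: the statement is the Claim_ definition above) =====
theorem read_instructions_spec : Claim_equal_read_instructions := by
  intro lines _
  unfold Spec_read_instructions read_instructions read_instructions_alt
  refine List.map_congr_left (fun line _ => ?_)
  simpa using pvFoldA_eq line.toList []
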